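-- pv_equiv track=rewrite | github.com/lexDAO/lexIpedia | utilities/petriPOWLapp_Large.py | _parse_openai_response
-- ===== SOURCE A (Python) =====
-- from typing import List, Dict, Any, Optional, Tuple
--
-- def _parse_openai_response(response: str) -> List[List]:
--     """Parse OpenAI response into relationships"""
--     relationships = []
--
--     # Skip header line if present
--     lines = response.strip().split('\n')
--     start_line = 0
--     if "source" in lines[0].lower() and "relationship" in lines[0].lower():
--         start_line = 1
--
--     for line in lines[start_line:]:
--         if not line.strip():
--             continue
--
--         # Handle CSV format with or without quotes
--         parts = []
--         in_quotes = False
--         current_part = ""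
--
--         for char in line:
--             if char == '"' or char == "'":
--                 in_quotes = not in_quotes
--             elif char == ',' and not in_quotes:
--                 parts.append(current_part.strip())
--                 current_part = ""
--             else:
--                 current_part += char
--
--         if current_part:
--             parts.append(current_part.strip())
--
--         if len(parts) >= 3:
--             source_id = parts[0]
--             rel_type = parts[1]
--             target_id = parts[2]
--
--             # Format for our app
--             source = f"id='{source_id}' type='Entity' properties={{}}"
--             target = f"id='{target_id}' type='Entity' properties={{}}"
--
--             relationships.append([source, rel_type, target])
--
--     return relationships
-- ===== SOURCE B (Python) =====
-- def _parse_openai_response(response: str):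
--     """Parse OpenAI response into relationships (split-on-comma then regroup by quote parity)."""
--     relationships = []
--
--     lines = response.strip().split('\n')
--     start_line = 0
--     if "source" in lines[0].lower() and "relationship" in lines[0].lower():
--         start_line = 1
--
--     for line in lines[start_line:]:
--         if not line.strip():
--             continue
--
--         pieces = line.split(',')
--         parts = []
--         field = pieces[0]
--         for piece in pieces[1:]:
--             if sum(1 for c in field if c in '"\'') % 2 == 0:
--                 parts.append(''.join(c for c in field if c not in '"\'').strip())
--                 field = piece
--             else:
--                 field = field + ',' + piece
--
--         cleaned = ''.join(c for c in field if c not in '"\'')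
--         if cleaned:
--             parts.append(cleaned.strip())
--
--         if len(parts) >= 3:
--             source = f"id='{parts[0]}' type='Entity' properties={{}}"
--             target = f"id='{parts[2]}' type='Entity' properties={{}}"
--             relationships.append([source, parts[1], target])
--
--     return relationships
-- ===== Notes on version B (the rewrite author's own statement) =====
-- stated objective: alternative
-- what changed: The per-line char-by-char quote-toggling state machine is replaced by splitting each line on commas and regrouping the pieces by quote parity, removing quotes and stripping only when a field closes; the outer line loop is unchanged.
import Mathlib
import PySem

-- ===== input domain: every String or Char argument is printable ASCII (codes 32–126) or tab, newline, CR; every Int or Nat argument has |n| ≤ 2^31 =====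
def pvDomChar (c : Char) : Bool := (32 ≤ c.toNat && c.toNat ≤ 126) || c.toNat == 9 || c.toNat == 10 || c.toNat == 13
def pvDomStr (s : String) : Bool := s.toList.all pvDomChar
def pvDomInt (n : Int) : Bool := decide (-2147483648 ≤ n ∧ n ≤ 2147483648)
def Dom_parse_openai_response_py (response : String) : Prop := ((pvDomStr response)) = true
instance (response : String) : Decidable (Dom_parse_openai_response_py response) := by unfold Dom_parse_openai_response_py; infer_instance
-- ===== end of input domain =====

-- B replaces A's char-by-char quote state machine by splitting each line on commas and regrouping
-- the pieces by quote parity (same outer loop, different per-line decomposition); objective: alternative.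

-- ===== PORT A =====
def pvIsQuote (c : Char) : Bool := c == '"' || c == '\''

def pvFmt (s : List Char) : List Char :=
  "id='".toList ++ s ++ "' type='Entity' properties={}".toList

def pvStepA (st : List (List Char) × Bool × List Char) (c : Char) :
    List (List Char) × Bool × List Char :=
  match st with
  | (parts, inq, cur) =>
    if pvIsQuote c then (parts, !inq, cur)
    else if c == ',' && !inq then (parts ++ [PySem.Chars.strip cur], inq, [])
    else (parts, inq, cur ++ [c])

def pvLineA (line : List Char) : List (List Char) :=
  let s := line.foldl pvStepA ([], false, [])
  if s.2.2 ≠ [] then s.1 ++ [PySem.Chars.strip s.2.2] else s.1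

def parse_openai_response_py (response : String) : List (List String) :=
  let lines := PySem.Chars.splitOn (PySem.Chars.strip response.toList) ['\n']
  let l0 := lines.headI
  let start : Nat :=
    if PySem.Chars.isIn "source".toList (PySem.Chars.lower l0) &&
       PySem.Chars.isIn "relationship".toList (PySem.Chars.lower l0) then 1 else 0
  (lines.drop start).foldl (fun rels line =>
    if PySem.Chars.strip line = [] then rels
    else
      let parts := pvLineA line
      if 3 ≤ parts.length then
        rels ++ [[String.ofList (pvFmt (parts.getD 0 [])), String.ofList (parts.getD 1 []),
                  String.ofList (pvFmt (parts.getD 2 []))]]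
      else rels) []

-- ===== PORT B =====
def pvRmq (field : List Char) : List Char := field.filter (fun c => !pvIsQuote c)

def pvGoB : List (List Char) → List Char → List (List Char) → List (List Char)
  | parts, field, [] =>
      let cleaned := pvRmq field
      if cleaned ≠ [] then parts ++ [PySem.Chars.strip cleaned] else parts
  | parts, field, p :: ps =>
      if field.countP pvIsQuote % 2 = 0 then
        pvGoB (parts ++ [PySem.Chars.strip (pvRmq field)]) p ps
      else
        pvGoB parts (field ++ ',' :: p) ps

def pvFieldsB (pieces : List (List Char)) : List (List Char) :=
  match pieces with
  | [] => []
  | p :: ps => pvGoB [] p ps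

def parse_openai_response_py_alt (response : String) : List (List String) :=
  let lines := PySem.Chars.splitOn (PySem.Chars.strip response.toList) ['\n']
  let l0 := lines.headI
  let start : Nat :=
    if PySem.Chars.isIn "source".toList (PySem.Chars.lower l0) &&
       PySem.Chars.isIn "relationship".toList (PySem.Chars.lower l0) then 1 else 0
  (lines.drop start).foldl (fun rels line =>
    if PySem.Chars.strip line = [] then rels
    else
      let parts := pvFieldsB (PySem.Chars.splitOn line [','])
      if 3 ≤ parts.length then
        rels ++ [[String.ofList (pvFmt (parts.getD 0 [])), String.ofList (parts.getD 1 []),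
                  String.ofList (pvFmt (parts.getD 2 []))]]
      else rels) []

-- ===== PRECONDITION & SPEC =====
def Spec_parse_openai_response_py (response : String) (out : List (List String)) : Prop := out = parse_openai_response_py_alt response
instance (response : String) (out : List (List String)) : Decidable (Spec_parse_openai_response_py response out) := by unfold Spec_parse_openai_response_py; infer_instance

-- ===== CLAIM (what is proved, stated in full; the proofs are below) =====
def Claim_equal_parse_openai_response_py : Prop := ∀ (response : String), Dom_parse_openai_response_py response → Spec_parse_openai_response_py response (parse_openai_response_py response)

-- ===== LEMMAS AND PROOFS =====

-- simple recursive characterisation of splitting on one character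
def pvSplit (c : Char) : List Char → List (List Char)
  | [] => [[]]
  | a :: rest => if a = c then [] :: pvSplit c rest else (pvSplit c rest).modifyHead (a :: ·)

def pvMHead (x : List Char) : List (List Char) → List (List Char)
  | [] => [x]
  | y :: ys => (x ++ y) :: ys

theorem pvSplit_ne_nil (c : Char) (s : List Char) : pvSplit c s ≠ [] := by
  induction s with
  | nil => simp [pvSplit]
  | cons a rest ih =>
      simp only [pvSplit]
      split
      · simp
      · cases h : pvSplit c rest with
        | nil => exact absurd h ih
        | cons y ys => simp [List.modifyHead]

theorem pvGo_eq (c : Char) (l : List Char) (cur : List Char) (acc : List (List Char)) (fuel : Nat)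
    (h : l.length < fuel) :
    PySem.Chars.splitOn.go [c] fuel l cur acc = acc.reverse ++ pvMHead cur.reverse (pvSplit c l) := by
  induction l generalizing cur acc fuel with
  | nil =>
      cases fuel with
      | zero => omega
      | succ f =>
          rw [PySem.Chars.splitOn.go] <;> simp [pvSplit, pvMHead]
  | cons a rest ih =>
      cases fuel with
      | zero => omega
      | succ f =>
          rw [PySem.Chars.splitOn.go]
          by_cases hac : a = c
          · subst hac
            simp only [List.isPrefixOf, BEq.rfl, Bool.true_and, List.isPrefixOf_nil_left,
              if_true, List.length_cons, List.length_nil, Nat.zero_add, List.drop_succ_cons,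
              List.drop_zero]
            rw [ih _ _ _ (by simpa using Nat.lt_of_succ_lt_succ h)]
            cases h2 : pvSplit a rest with
            | nil => exact absurd h2 (pvSplit_ne_nil a rest)
            | cons m0 ms => simp [pvSplit, pvMHead, h2]
          · have hpre : [c].isPrefixOf (a :: rest) = false := by
              simp [List.isPrefixOf]
              intro hh
              exact absurd hh.symm hac
            rw [hpre]
            simp only [Bool.false_eq_true, if_false]
            rw [ih _ _ _ (by simpa using Nat.lt_of_succ_lt_succ h)]
            cases h2 : pvSplit c rest with
            | nil => exact absurd h2 (pvSplit_ne_nil c rest)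
            | cons m0 ms => simp [pvSplit, pvMHead, h2, hac, List.modifyHead]

theorem pvSplitOn_eq (c : Char) (s : List Char) :
    PySem.Chars.splitOn s [c] = pvSplit c s := by
  rw [PySem.Chars.splitOn, pvGo_eq c s [] [] (s.length + 1) (by omega)]
  cases h2 : pvSplit c s with
  | nil => exact absurd h2 (pvSplit_ne_nil c s)
  | cons m0 ms => simp [pvMHead]

theorem pvSplit_join (c : Char) (s : List Char) (p : List Char) (ps : List (List Char))
    (h : pvSplit c s = p :: ps) : p ++ ps.flatMap (fun q => c :: q) = s := by
  induction s generalizing p ps with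
  | nil =>
      simp [pvSplit] at h
      simp [h.1, h.2]
  | cons a rest ih =>
      by_cases hac : a = c
      · subst hac
        simp only [pvSplit, if_true] at h
        cases h2 : pvSplit a rest with
        | nil => exact absurd h2 (pvSplit_ne_nil a rest)
        | cons m0 ms =>
            rw [h2] at h
            obtain ⟨rfl, rfl⟩ := by simpa using h
            simpa using ih _ _ h2
      · simp only [pvSplit, hac, if_false] at h
        cases h2 : pvSplit c rest with
        | nil => exact absurd h2 (pvSplit_ne_nil c rest)
        | cons m0 ms =>
            rw [h2] at h
            simp [List.modifyHead] at h
            obtain ⟨rfl, rfl⟩ := h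
            simpa using congrArg (a :: ·) (ih _ _ h2)

theorem pvSplit_not_mem (c : Char) (s : List Char) :
    ∀ p ∈ pvSplit c s, c ∉ p := by
  induction s with
  | nil => simp [pvSplit]
  | cons a rest ih =>
      by_cases hac : a = c
      · subst hac
        simp only [pvSplit, if_true]
        intro p hp
        rcases List.mem_cons.mp hp with rfl | hp
        · simp
        · exact ih p hp
      · simp only [pvSplit, hac, if_false]
        cases h2 : pvSplit c rest with
        | nil => exact absurd h2 (pvSplit_ne_nil c rest)
        | cons m0 ms =>
            intro p hp
            rcases List.mem_cons.mp (by simpa [List.modifyHead] using hp) with rfl | hp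
            · intro hc
              rcases List.mem_cons.mp hc with rfl | hc
              · exact hac rfl
              · exact ih m0 (by simp [h2]) hc
            · exact ih p (by simp [h2, hp])

theorem pvChunk (p : List Char) (hp : ',' ∉ p) (parts : List (List Char)) (inq : Bool)
    (cur : List Char) :
    p.foldl pvStepA (parts, inq, cur) =
      (parts, xor inq (p.countP pvIsQuote % 2 == 1), cur ++ pvRmq p) := by
  induction p generalizing inq cur with
  | nil => simp [pvRmq]
  | cons a rest ih =>
      have ha : a ≠ ',' := fun hh => hp (hh ▸ List.mem_cons_self)
      have hrest : ',' ∉ rest := fun hh => hp (List.mem_cons_of_mem _ hh)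
      by_cases hq : pvIsQuote a = true
      · simp only [List.foldl_cons, pvStepA, hq, if_true]
        rw [ih hrest]
        have hcnt : (a :: rest).countP pvIsQuote = rest.countP pvIsQuote + 1 := by
          simp [List.countP_cons, hq]
        have hrmq : pvRmq (a :: rest) = pvRmq rest := by simp [pvRmq, hq]
        rw [hcnt, hrmq]
        rcases Nat.mod_two_eq_zero_or_one (rest.countP pvIsQuote) with h2 | h2 <;>
          cases inq <;> simp [Nat.add_mod, h2]
      · have hcomma : (a == ',' && !inq) = false := by
          simp [ha]
        simp only [List.foldl_cons, pvStepA, hq, Bool.false_eq_true, if_false, hcomma]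
        rw [ih hrest]
        have hcnt : (a :: rest).countP pvIsQuote = rest.countP pvIsQuote := by
          simp [List.countP_cons, hq]
        have hrmq : pvRmq (a :: rest) = a :: pvRmq rest := by simp [pvRmq, hq]
        rw [hcnt, hrmq]
        simp

def pvFinA (s : List (List Char) × Bool × List Char) : List (List Char) :=
  if s.2.2 ≠ [] then s.1 ++ [PySem.Chars.strip s.2.2] else s.1

theorem pvMain (ps : List (List Char)) (field : List Char) (parts : List (List Char))
    (pvhps : ∀ p ∈ ps, ',' ∉ p) :
    pvFinA ((ps.flatMap (fun q => ',' :: q)).foldl pvStepA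
        (parts, (field.countP pvIsQuote % 2 == 1), pvRmq field)) = pvGoB parts field ps := by
  induction ps generalizing field parts with
  | nil => simp [pvFinA, pvGoB, pvRmq]
  | cons p ps ih =>
      have hp : ',' ∉ p := pvhps p List.mem_cons_self
      have hps' : ∀ q ∈ ps, ',' ∉ q := fun q hq => pvhps q (List.mem_cons_of_mem _ hq)
      simp only [List.flatMap_cons, List.foldl_cons, List.foldl_append]
      rcases Nat.mod_two_eq_zero_or_one (field.countP pvIsQuote) with h2 | h2
      · have hstep : pvStepA (parts, (field.countP pvIsQuote % 2 == 1), pvRmq field) ',' =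
            (parts ++ [PySem.Chars.strip (pvRmq field)], false, []) := by
          simp [pvStepA, pvIsQuote, h2]
        rw [hstep, pvChunk p hp]
        have := ih p (parts ++ [PySem.Chars.strip (pvRmq field)]) hps'
        simp only [List.nil_append, Bool.false_xor] at this ⊢
        rw [this]
        simp [pvGoB, h2]
      · have hstep : pvStepA (parts, (field.countP pvIsQuote % 2 == 1), pvRmq field) ',' =
            (parts, true, pvRmq field ++ [',']) := by
          simp [pvStepA, pvIsQuote, h2]
        rw [hstep, pvChunk p hp]
        have hcnt : ((field ++ ',' :: p).countP pvIsQuote % 2 == 1) =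
            xor true (p.countP pvIsQuote % 2 == 1) := by
          have : (field ++ ',' :: p).countP pvIsQuote =
              field.countP pvIsQuote + p.countP pvIsQuote := by
            simp [List.countP_append, List.countP_cons, pvIsQuote]
          rw [this]
          rcases Nat.mod_two_eq_zero_or_one (p.countP pvIsQuote) with h3 | h3 <;>
            simp [Nat.add_mod, h2, h3]
        have hrmq : pvRmq (field ++ ',' :: p) = (pvRmq field ++ [',']) ++ pvRmq p := by
          simp [pvRmq, List.filter_append, pvIsQuote]
        have := ih (field ++ ',' :: p) parts hps'
        rw [hcnt, hrmq] at this
        rw [this]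
        simp [pvGoB, h2]

theorem pvLine_eq (line : List Char) :
    pvFieldsB (PySem.Chars.splitOn line [',']) = pvLineA line := by
  rw [pvSplitOn_eq]
  cases h : pvSplit ',' line with
  | nil => exact absurd h (pvSplit_ne_nil ',' line)
  | cons p ps =>
      have hjoin := pvSplit_join ',' line p ps h
      have hmem := pvSplit_not_mem ',' line
      have hp : ',' ∉ p := hmem p (by simp [h])
      have hps : ∀ q ∈ ps, ',' ∉ q := fun q hq => hmem q (by simp [h, hq])
      have hA : pvLineA line = pvFinA (line.foldl pvStepA ([], false, [])) := rfl
      rw [pvFieldsB, hA, ← hjoin, List.foldl_append, pvChunk p hp]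
      have := pvMain ps p [] hps
      simpa using this.symm

-- ===== VERDICT (by name: the statement is the Claim_ definition above) =====
theorem parse_openai_response_py_spec : Claim_equal_parse_openai_response_py := by
  intro response _
  unfold Spec_parse_openai_response_py parse_openai_response_py parse_openai_response_py_alt
  simp only [pvLine_eq]
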